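-- pv_equiv track=rewrite | github.com/phamos-eu/jedermann | jedermann/events/jinja_functions.py | get_article_and_description_column_width
-- ===== SOURCE A (Python) =====
-- def get_article_and_description_column_width(items, key, total_both_columns_width):
--     item_col_lengths = (11, 20, 25)
--     column_width = {
--         "item_code": 0,
--         "description": 0,
--     }
--
--     max_item_code_length = max([(item.get('item_code') or '').__len__() for item in items])
--     max_customer_item_code_length = max([(item.get('customer_item_code') or '').__len__() for item in items])
--
--     max_item_code_length = max(max_item_code_length, max_customer_item_code_length)
--
--     if max_item_code_length <= 11:
--         column_width["item_code"] = item_col_lengths[0]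
--         column_width["description"] =   total_both_columns_width - item_col_lengths[0]
--
--     elif max_item_code_length <= 20:
--         column_width["item_code"] = item_col_lengths[1]
--         column_width["description"] = total_both_columns_width - item_col_lengths[1]
--     else:
--         column_width["item_code"] = item_col_lengths[2]
--         column_width["description"] = total_both_columns_width - item_col_lengths[2]
--
--     return column_width.get(key, 0)
-- ===== SOURCE B (Python) =====
-- def get_article_and_description_column_width(items, key, total_both_columns_width):
--     # No maximum is computed: classify by short-circuit existence scans.
--     def exceeds(limit):
--         return any(len(i.get('item_code') or '') > limit
--                    or len(i.get('customer_item_code') or '') > limit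
--                    for i in items)
--     w = 25 if exceeds(20) else 20 if exceeds(11) else 11
--     if key == "item_code":
--         return w
--     if key == "description":
--         return total_both_columns_width - w
--     return 0
-- ===== Notes on version B (the rewrite author's own statement) =====
-- stated objective: alternative
-- what changed: B never computes the maximum length: it picks the width bucket by two short-circuit existence scans (any code longer than 20, else any longer than 11), and replaces the dict build + dict.get with a direct key test.
import Mathlib
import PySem

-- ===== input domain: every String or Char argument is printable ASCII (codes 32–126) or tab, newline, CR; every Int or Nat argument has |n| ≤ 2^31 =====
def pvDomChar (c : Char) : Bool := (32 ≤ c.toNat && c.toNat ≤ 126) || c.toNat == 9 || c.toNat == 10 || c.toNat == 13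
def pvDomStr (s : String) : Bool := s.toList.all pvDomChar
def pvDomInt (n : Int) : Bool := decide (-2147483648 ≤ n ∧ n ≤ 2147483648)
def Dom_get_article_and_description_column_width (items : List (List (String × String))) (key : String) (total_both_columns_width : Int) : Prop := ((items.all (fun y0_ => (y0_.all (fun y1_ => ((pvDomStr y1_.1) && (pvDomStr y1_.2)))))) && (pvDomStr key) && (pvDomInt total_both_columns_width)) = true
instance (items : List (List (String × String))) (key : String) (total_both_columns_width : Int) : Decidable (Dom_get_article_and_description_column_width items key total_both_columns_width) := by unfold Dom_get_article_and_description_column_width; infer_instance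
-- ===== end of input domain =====

-- B replaces A's max-then-threshold computation by short-circuit existence scans (no maximum is computed); same asymptotic cost.

-- ===== PORT A =====
-- item.get(k) or '' : first-match association-list lookup, falsy (missing or "") becomes ""
def pvGetKeyOrEmpty (item : List (String × String)) (k : String) : String :=
  match item.find? (fun p => p.1 == k) with
  | some p => p.2
  | none => ""

def get_article_and_description_column_width (items : List (List (String × String))) (key : String) (total_both_columns_width : Int) : Int :=
  -- max([...]) raises ValueError on empty items: outside Pre_, so .getD 0 is never reached inside Pre_
  let max_item_code_length := (PySem.List.max? (items.map (fun item => PySem.Str.len (pvGetKeyOrEmpty item "item_code"))) (fun x => x)).getD 0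
  let max_customer_item_code_length := (PySem.List.max? (items.map (fun item => PySem.Str.len (pvGetKeyOrEmpty item "customer_item_code"))) (fun x => x)).getD 0
  let m := max max_item_code_length max_customer_item_code_length
  let column_width : PySem.Dict String Int := (PySem.Dict.empty.insert "item_code" 0).insert "description" 0
  let column_width :=
    if m ≤ 11 then
      (column_width.insert "item_code" 11).insert "description" (total_both_columns_width - 11)
    else if m ≤ 20 then
      (column_width.insert "item_code" 20).insert "description" (total_both_columns_width - 20)
    else
      (column_width.insert "item_code" 25).insert "description" (total_both_columns_width - 25)
  column_width.getD key 0

-- ===== PORT B =====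
-- any(... for i in items) : short-circuit existence scan
def pvExceeds (items : List (List (String × String))) (limit : Int) : Bool :=
  items.any (fun i =>
    decide (limit < PySem.Str.len (pvGetKeyOrEmpty i "item_code"))
    || decide (limit < PySem.Str.len (pvGetKeyOrEmpty i "customer_item_code")))

def get_article_and_description_column_width_alt (items : List (List (String × String))) (key : String) (total_both_columns_width : Int) : Int :=
  let w : Int := if pvExceeds items 20 then 25 else if pvExceeds items 11 then 20 else 11
  if key = "item_code" then w
  else if key = "description" then total_both_columns_width - w
  else 0

-- ===== PRECONDITION & SPEC =====
-- Pre_ excludes exactly the empty items list, on which A raises ValueError (max of an empty sequence).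
def Pre_get_article_and_description_column_width (items : List (List (String × String))) (key : String) (total_both_columns_width : Int) : Prop := items ≠ []
instance (items : List (List (String × String))) (key : String) (total_both_columns_width : Int) : Decidable (Pre_get_article_and_description_column_width items key total_both_columns_width) := by unfold Pre_get_article_and_description_column_width; infer_instance
def pvWitness_get_article_and_description_column_width : (List (List (String × String))) × String × Int := ([[("item_code", "A1")]], "item_code", 60)

def Spec_get_article_and_description_column_width (items : List (List (String × String))) (key : String) (total_both_columns_width : Int) (out : Int) : Prop := out = get_article_and_description_column_width_alt items key total_both_columns_width
instance (items : List (List (String × String))) (key : String) (total_both_columns_width : Int) (out : Int) : Decidable (Spec_get_article_and_description_column_width items key total_both_columns_width out) := by unfold Spec_get_article_and_description_column_width; infer_instance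

-- ===== CLAIM (what is proved, stated in full; the proofs are below) =====
def Claim_equal_get_article_and_description_column_width : Prop := ∀ (items : List (List (String × String))) (key : String) (total_both_columns_width : Int), Dom_get_article_and_description_column_width items key total_both_columns_width → Pre_get_article_and_description_column_width items key total_both_columns_width → Spec_get_article_and_description_column_width items key total_both_columns_width (get_article_and_description_column_width items key total_both_columns_width)

-- ===== LEMMAS AND PROOFS =====

-- l < a running foldl max iff l is beaten by the seed or by some element
theorem pv_lt_foldl_max (xs : List Int) (a l : Int) :
    l < xs.foldl max a ↔ l < a ∨ ∃ x ∈ xs, l < x := by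
  induction xs generalizing a with
  | nil => simp
  | cons y t ih =>
      simp only [List.foldl_cons, ih, lt_max_iff, List.mem_cons]
      constructor
      · rintro ((h | h) | ⟨x, hx, hlt⟩)
        · exact Or.inl h
        · exact Or.inr ⟨y, Or.inl rfl, h⟩
        · exact Or.inr ⟨x, Or.inr hx, hlt⟩
      · rintro (h | ⟨x, (rfl | hx), hlt⟩)
        · exact Or.inl (Or.inl h)
        · exact Or.inl (Or.inr hlt)
        · exact Or.inr ⟨x, hx, hlt⟩

-- B's existence scan agrees with "limit < A's combined maximum" on a nonempty list
theorem pv_exceeds_iff (i : List (String × String)) (rest : List (List (String × String))) (l : Int) :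
    pvExceeds (i :: rest) l = true ↔
      l < max ((rest.map (fun item => PySem.Str.len (pvGetKeyOrEmpty item "item_code"))).foldl max (PySem.Str.len (pvGetKeyOrEmpty i "item_code")))
              ((rest.map (fun item => PySem.Str.len (pvGetKeyOrEmpty item "customer_item_code"))).foldl max (PySem.Str.len (pvGetKeyOrEmpty i "customer_item_code"))) := by
  simp only [pvExceeds, List.any_cons, List.any_eq_true, Bool.or_eq_true, decide_eq_true_eq,
    lt_max_iff, pv_lt_foldl_max, List.mem_map]
  constructor
  · rintro ((h | h) | ⟨x, hx, h⟩)
    · exact Or.inl (Or.inl h)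
    · exact Or.inr (Or.inl h)
    · rcases h with h | h
      · exact Or.inl (Or.inr ⟨_, ⟨x, hx, rfl⟩, h⟩)
      · exact Or.inr (Or.inr ⟨_, ⟨x, hx, rfl⟩, h⟩)
  · rintro ((h | ⟨_, ⟨x, hx, rfl⟩, h⟩) | (h | ⟨_, ⟨x, hx, rfl⟩, h⟩))
    · exact Or.inl (Or.inl h)
    · exact Or.inr ⟨x, hx, Or.inl h⟩
    · exact Or.inl (Or.inr h)
    · exact Or.inr ⟨x, hx, Or.inr h⟩

theorem get_article_and_description_column_width_spec : Claim_equal_get_article_and_description_column_width := by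
  intro items key w _ hpre
  unfold Spec_get_article_and_description_column_width
  unfold get_article_and_description_column_width get_article_and_description_column_width_alt
  obtain ⟨i, rest, rfl⟩ : ∃ i rest, items = i :: rest := by
    cases items with
    | nil => exact absurd rfl hpre
    | cons i rest => exact ⟨i, rest, rfl⟩
  simp only [List.map_cons, PySem.List.max?_id_cons, Option.getD_some]
  have e20 := pv_exceeds_iff i rest 20
  have e11 := pv_exceeds_iff i rest 11
  set m := max ((rest.map (fun item => PySem.Str.len (pvGetKeyOrEmpty item "item_code"))).foldl max (PySem.Str.len (pvGetKeyOrEmpty i "item_code")))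
              ((rest.map (fun item => PySem.Str.len (pvGetKeyOrEmpty item "customer_item_code"))).foldl max (PySem.Str.len (pvGetKeyOrEmpty i "customer_item_code"))) with hm
  have h20 : pvExceeds (i :: rest) 20 = decide (20 < m) := by
    rw [Bool.eq_iff_iff, e20]; simp
  have h11 : pvExceeds (i :: rest) 11 = decide (11 < m) := by
    rw [Bool.eq_iff_iff, e11]; simp
  rw [h20, h11]
  by_cases hA : m ≤ 11
  · have h1 : ¬ (11 : Int) < m := by omega
    have h2 : ¬ (20 : Int) < m := by omega
    simp [hA, h1, h2, PySem.Dict.getD_insert]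
    by_cases hk : key = "description" <;> by_cases hk2 : key = "item_code" <;> simp_all
  · by_cases hB : m ≤ 20
    · have h1 : (11 : Int) < m := by omega
      have h2 : ¬ (20 : Int) < m := by omega
      simp [hA, hB, h1, h2, PySem.Dict.getD_insert]
      by_cases hk : key = "description" <;> by_cases hk2 : key = "item_code" <;> simp_all
    · have h1 : (11 : Int) < m := by omega
      have h2 : (20 : Int) < m := by omega
      simp [hA, hB, h2, PySem.Dict.getD_insert]
      by_cases hk : key = "description" <;> by_cases hk2 : key = "item_code" <;> simp_all
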